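-- pv_equiv track=rewrite | github.com/robotocore/robotocore | src/robotocore/services/stepfunctions/intrinsics.py | _states_array_range
-- ===== SOURCE A (Python) =====
-- class IntrinsicError(Exception):
--     """Raised when an intrinsic function call fails."""
--
-- def _states_array_range(start: int, end: int, step: int) -> list[int]:
--     """States.ArrayRange — generate range of integers."""
--     start, end, step = int(start), int(end), int(step)
--     if step == 0:
--         raise IntrinsicError("States.ArrayRange: step must not be zero")
--     result = []
--     current = start
--     if step > 0:
--         while current <= end:
--             result.append(current)
--             current += step
--     else:
--         while current >= end:
--             result.append(current)
--             current += step
--     return result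
-- ===== SOURCE B (Python) =====
-- class IntrinsicError(Exception):
--     """Raised when an intrinsic function call fails."""
--
-- def _states_array_range(start: int, end: int, step: int) -> list[int]:
--     """States.ArrayRange — generate range of integers (closed-form length)."""
--     start, end, step = int(start), int(end), int(step)
--     if step == 0:
--         raise IntrinsicError("States.ArrayRange: step must not be zero")
--     n = (end - start) // step + 1
--     return [start + i * step for i in range(max(0, n))]
-- ===== Notes on version B (the rewrite author's own statement) =====
-- stated objective: simpler
-- what changed: Replaced the sign-branched while-loop accumulation by a closed-form element count n = (end-start)//step + 1 and a single comprehension [start+i*step for i in range(max(0,n))].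
import Mathlib
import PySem

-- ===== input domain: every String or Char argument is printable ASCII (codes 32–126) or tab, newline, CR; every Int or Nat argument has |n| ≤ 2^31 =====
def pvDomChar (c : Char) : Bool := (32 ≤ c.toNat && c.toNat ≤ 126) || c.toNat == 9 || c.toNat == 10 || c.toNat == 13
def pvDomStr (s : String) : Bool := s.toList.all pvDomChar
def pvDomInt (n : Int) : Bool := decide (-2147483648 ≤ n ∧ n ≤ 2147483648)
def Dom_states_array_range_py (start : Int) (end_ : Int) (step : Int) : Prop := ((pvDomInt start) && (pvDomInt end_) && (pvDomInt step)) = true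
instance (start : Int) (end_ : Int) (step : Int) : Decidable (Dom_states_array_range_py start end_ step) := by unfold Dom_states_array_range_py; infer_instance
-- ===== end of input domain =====

-- B replaces A's sign-branched while loops by a closed-form element count and one comprehension (objective: simpler).

-- ===== PORT A =====
-- 'while current <= end: result.append(current); current += step'  (step > 0)
def pvLoopUpA (end_ step : Int) (hs : 0 < step) (current : Int) (result : List Int) : List Int :=
  if h : current ≤ end_ then pvLoopUpA end_ step hs (current + step) (result ++ [current]) else result
termination_by (end_ - current + 1).toNat
decreasing_by omega

-- 'while current >= end: result.append(current); current += step'  (step < 0)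
def pvLoopDownA (end_ step : Int) (hs : step < 0) (current : Int) (result : List Int) : List Int :=
  if h : end_ ≤ current then pvLoopDownA end_ step hs (current + step) (result ++ [current]) else result
termination_by (current - end_ + 1).toNat
decreasing_by omega

def states_array_range_py (start : Int) (end_ : Int) (step : Int) : List Int :=
  -- step == 0 raises IntrinsicError in Python; excluded by Pre_, the port returns [] there
  if h : 0 < step then pvLoopUpA end_ step h start []
  else if h2 : step < 0 then pvLoopDownA end_ step h2 start []
  else []

-- ===== PORT B =====
def states_array_range_py_alt (start : Int) (end_ : Int) (step : Int) : List Int :=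
  -- step == 0 raises IntrinsicError in Python; excluded by Pre_, the port returns [] there
  if step = 0 then []
  else
    let n := PySem.Int.floordiv (end_ - start) step + 1
    (PySem.List.pyRange 0 (max 0 n) 1).map (fun i => start + i * step)

-- ===== PRECONDITION & SPEC =====
-- Pre_ excludes exactly step = 0, where A (and B) raise IntrinsicError.
def Pre_states_array_range_py (start : Int) (end_ : Int) (step : Int) : Prop := step ≠ 0
instance (start : Int) (end_ : Int) (step : Int) : Decidable (Pre_states_array_range_py start end_ step) := by unfold Pre_states_array_range_py; infer_instance
def pvWitness_states_array_range_py : Int × Int × Int := (0, 5, 2)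

def Spec_states_array_range_py (start : Int) (end_ : Int) (step : Int) (out : List Int) : Prop := out = states_array_range_py_alt start end_ step
instance (start : Int) (end_ : Int) (step : Int) (out : List Int) : Decidable (Spec_states_array_range_py start end_ step out) := by unfold Spec_states_array_range_py; infer_instance

-- ===== CLAIM (what is proved, stated in full; the proofs are below) =====
def Claim_equal_states_array_range_py : Prop := ∀ (start : Int) (end_ : Int) (step : Int), Dom_states_array_range_py start end_ step → Pre_states_array_range_py start end_ step → Spec_states_array_range_py start end_ step (states_array_range_py start end_ step)

-- ===== LEMMAS AND PROOFS =====

lemma pv_fd_nonneg_iff (a b : Int) (hb : 0 < b) : 0 ≤ PySem.Int.floordiv a b ↔ 0 ≤ a := by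
  have h := PySem.Int.le_floordiv_iff_mul_le (a := a) (b := b) (q := 0) hb
  simpa using h

lemma pv_fd_shift (a b : Int) (hb : 0 < b) :
    PySem.Int.floordiv (a - b) b = PySem.Int.floordiv a b - 1 := by
  have h := (PySem.Int.floordiv_eq_iff_of_pos (a := a) (b := b) (q := PySem.Int.floordiv a b) hb).mp rfl
  rw [PySem.Int.floordiv_eq_iff_of_pos hb]
  constructor
  · nlinarith [h.1]
  · nlinarith [h.2]

-- invariant of A's positive-step loop: it appends the closed-form range
lemma pvLoopUpA_eq (end_ step : Int) (hs : 0 < step) :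
    ∀ (k : Nat) (current : Int) (result : List Int),
      k = (PySem.Int.floordiv (end_ - current) step + 1).toNat →
      pvLoopUpA end_ step hs current result
        = result ++ (List.range k).map (fun i : Nat => current + i * step) := by
  intro k
  induction k with
  | zero =>
    intro current result hk
    have hlt : ¬ current ≤ end_ := by
      intro hle
      have : 0 ≤ PySem.Int.floordiv (end_ - current) step :=
        (pv_fd_nonneg_iff _ _ hs).mpr (by omega)
      omega
    rw [pvLoopUpA.eq_def]
    simp [hlt]
  | succ m ih =>
    intro current result hk
    have hfd0 : 0 ≤ PySem.Int.floordiv (end_ - current) step := by omega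
    have hle : current ≤ end_ := by
      by_contra hgt
      have : ¬ 0 ≤ PySem.Int.floordiv (end_ - current) step := by
        rw [pv_fd_nonneg_iff _ _ hs]; omega
      exact this hfd0
    have hshift : PySem.Int.floordiv (end_ - (current + step)) step
        = PySem.Int.floordiv (end_ - current) step - 1 := by
      have := pv_fd_shift (end_ - current) step hs
      rw [← this]; ring_nf
    rw [pvLoopUpA.eq_def]
    simp only [hle, dite_true]
    rw [ih (current + step) (result ++ [current]) (by omega)]
    have hmap : (List.range (m + 1)).map (fun i : Nat => current + i * step)
        = current :: (List.range m).map (fun i : Nat => (current + step) + i * step) := by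
      rw [List.range_succ_eq_map, List.map_cons, List.map_map]
      congr 1
      · push_cast; ring
      · apply List.map_congr_left
        intro i _
        simp only [Function.comp_apply]
        push_cast; ring
    rw [hmap]
    simp

-- invariant of A's negative-step loop
lemma pvLoopDownA_eq (end_ step : Int) (hs : step < 0) :
    ∀ (k : Nat) (current : Int) (result : List Int),
      k = (PySem.Int.floordiv (end_ - current) step + 1).toNat →
      pvLoopDownA end_ step hs current result
        = result ++ (List.range k).map (fun i : Nat => current + i * step) := by
  intro k
  have hflip : ∀ a : Int, PySem.Int.floordiv a step = PySem.Int.floordiv (-a) (-step) := by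
    intro a
    have := PySem.Int.floordiv_neg_neg (a := a) (b := step)
    simpa using this.symm
  induction k with
  | zero =>
    intro current result hk
    have hlt : ¬ end_ ≤ current := by
      intro hle
      have : 0 ≤ PySem.Int.floordiv (end_ - current) step := by
        rw [hflip]
        exact (pv_fd_nonneg_iff _ _ (by omega)).mpr (by omega)
      omega
    rw [pvLoopDownA.eq_def]
    simp [hlt]
  | succ m ih =>
    intro current result hk
    have hfd0 : 0 ≤ PySem.Int.floordiv (end_ - current) step := by omega
    have hle : end_ ≤ current := by
      by_contra hgt
      have : ¬ 0 ≤ PySem.Int.floordiv (end_ - current) step := by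
        rw [hflip, pv_fd_nonneg_iff _ _ (by omega)]; omega
      exact this hfd0
    have hshift : PySem.Int.floordiv (end_ - (current + step)) step
        = PySem.Int.floordiv (end_ - current) step - 1 := by
      rw [hflip, hflip (end_ - current)]
      have := pv_fd_shift (-(end_ - current)) (-step) (by omega)
      rw [← this]; ring_nf
    rw [pvLoopDownA.eq_def]
    simp only [hle, dite_true]
    rw [ih (current + step) (result ++ [current]) (by omega)]
    have hmap : (List.range (m + 1)).map (fun i : Nat => current + i * step)
        = current :: (List.range m).map (fun i : Nat => (current + step) + i * step) := by
      rw [List.range_succ_eq_map, List.map_cons, List.map_map]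
      congr 1
      · push_cast; ring
      · apply List.map_congr_left
        intro i _
        simp only [Function.comp_apply]
        push_cast; ring
    rw [hmap]
    simp

lemma pv_alt_eq_range (start end_ step : Int) (hstep : step ≠ 0) :
    states_array_range_py_alt start end_ step
      = (List.range (PySem.Int.floordiv (end_ - start) step + 1).toNat).map
          (fun i : Nat => start + i * step) := by
  unfold states_array_range_py_alt
  simp only [hstep, if_false]
  rw [PySem.List.pyRange_one, List.map_map]
  have hn : (max 0 (PySem.Int.floordiv (end_ - start) step + 1) - 0).toNat
      = (PySem.Int.floordiv (end_ - start) step + 1).toNat := by omega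
  rw [hn]
  apply List.map_congr_left
  intro i _
  simp only [Function.comp_apply]
  ring

-- ===== VERDICT (by name: the statement is the Claim_ definition above) =====
theorem states_array_range_py_spec : Claim_equal_states_array_range_py := by
  intro start end_ step _hdom hpre
  unfold Spec_states_array_range_py
  rw [pv_alt_eq_range start end_ step hpre]
  unfold states_array_range_py
  by_cases h : 0 < step
  · simp only [h, dite_true]
    rw [pvLoopUpA_eq end_ step h _ start [] rfl]
    simp
  · have h2 : step < 0 := by
      unfold Pre_states_array_range_py at hpre; omega
    simp only [h, h2, dite_true, dite_false]
    rw [pvLoopDownA_eq end_ step h2 _ start [] rfl]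
    simp
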